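-- pv_equiv track=rewrite | github.com/pjamesjoyce/etnredmud | wsgi/myproject/bibconvert/views.py | authorParse
-- ===== SOURCE A (Python) =====
-- def authorParse(authorList):
--
--     sl = authorList.split(' ')
--     andCount = sl.count('and')
--     andCheck = 0
--
--     for i,a in enumerate(sl):
--         if a == 'and':
--             andCheck+=1
--             if andCheck!=andCount:
--                 sl[i] = ', '
--     return ' '.join(sl)
-- ===== SOURCE B (Python) =====
-- def authorParse(authorList):
--     out = []
--     seen = False
--     for a in reversed(authorList.split(' ')):
--         if a == 'and':
--             out.append('and' if not seen else ', ')
--             seen = True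
--         else:
--             out.append(a)
--     return ' '.join(reversed(out))
-- ===== Notes on version B (the rewrite author's own statement) =====
-- stated objective: simpler
-- what changed: Replaces A's count-occurrences-then-mutate-in-place forward pass (running counter compared to a precomputed total, index assignment into the split list) by a single right-to-left pass with a boolean flag that keeps the first conjunction met from the right and rewrites the rest, building a fresh output list that is reversed at the end.
import Mathlib
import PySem

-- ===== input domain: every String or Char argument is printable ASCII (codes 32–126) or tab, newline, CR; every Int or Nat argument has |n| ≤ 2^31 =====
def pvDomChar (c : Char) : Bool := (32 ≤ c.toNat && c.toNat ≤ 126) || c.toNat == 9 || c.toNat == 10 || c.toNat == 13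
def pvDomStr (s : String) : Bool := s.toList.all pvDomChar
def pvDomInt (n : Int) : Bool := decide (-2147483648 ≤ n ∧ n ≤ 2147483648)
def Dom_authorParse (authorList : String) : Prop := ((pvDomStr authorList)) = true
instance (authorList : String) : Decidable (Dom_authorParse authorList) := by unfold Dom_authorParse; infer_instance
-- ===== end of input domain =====

-- B replaces A's count-then-mutate forward pass by a single RIGHT-TO-LEFT pass with a
-- boolean flag that keeps the first conjunction met from the right and rewrites
-- the rest, building a fresh output list — simpler decomposition, no counting pass.

-- ===== PORT A =====
def authorParse (authorList : String) : String :=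
  let sl := (PySem.Str.split? authorList " ").getD []
  let andCount := PySem.List.count sl "and"
  let r := (PySem.List.enumerate sl 0).foldl
    (fun (st : Nat × List String) (p : Int × String) =>
      if p.2 = "and" then
        let andCheck := st.1 + 1
        if andCheck ≠ andCount then (andCheck, PySem.List.pySetD st.2 p.1 ", ")
        else (andCheck, st.2)
      else st) (0, sl)
  PySem.Str.join " " r.2

-- ===== PORT B =====
def authorParse_alt (authorList : String) : String :=
  let sl := (PySem.Str.split? authorList " ").getD []
  let r := sl.reverse.foldl
    (fun (st : Bool × List String) (a : String) =>
      if a = "and" then (true, st.2 ++ [if st.1 = false then "and" else ", "])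
      else (st.1, st.2 ++ [a])) (false, ([] : List String))
  PySem.Str.join " " r.2.reverse

-- ===== PRECONDITION & SPEC =====
def Spec_authorParse (authorList : String) (out : String) : Prop := out = authorParse_alt authorList
instance (authorList : String) (out : String) : Decidable (Spec_authorParse authorList out) := by unfold Spec_authorParse; infer_instance

-- ===== CLAIM (what is proved, stated in full; the proofs are below) =====
def Claim_equal_authorParse : Prop := ∀ (authorList : String), Dom_authorParse authorList → Spec_authorParse authorList (authorParse authorList)

-- ===== LEMMAS AND PROOFS =====

/-- The common mathematical description: replace every "and" that has another "and" after it. -/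
def pvRep : List String → List String
  | [] => []
  | x :: xs => (if x = "and" ∧ "and" ∈ xs then ", " else x) :: pvRep xs

/-- Generalisation for B's right-to-left pass: `seen` = an "and" occurs further right. -/
def pvRepS (seen : Bool) : List String → List String
  | [] => []
  | x :: xs => (if x = "and" ∧ (seen = true ∨ "and" ∈ xs) then ", " else x) :: pvRepS seen xs

theorem pvRepS_false (l : List String) : pvRepS false l = pvRep l := by
  induction l with
  | nil => rfl
  | cons x xs ih => simp [pvRepS, pvRep, ih]

theorem pvSet_at_len {α : Type} (done : List α) (x v : α) (xs : List α) :
    PySem.List.pySetD (done ++ x :: xs) (done.length : Int) v = done ++ v :: xs := by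
  rw [PySem.List.pySetD_natCast]
  induction done with
  | nil => rfl
  | cons d ds ih => simp [ih]

/-- A's fold: invariant on the counter versus the total count. -/
theorem pvFoldA (N : Nat) (l done : List String) (c : Nat) (h : c + l.count "and" = N) :
    (PySem.List.enumerate l (done.length : Int)).foldl
      (fun (st : Nat × List String) (p : Int × String) =>
        if p.2 = "and" then
          let andCheck := st.1 + 1
          if andCheck ≠ N then (andCheck, PySem.List.pySetD st.2 p.1 ", ")
          else (andCheck, st.2)
        else st) (c, done ++ l) = (N, done ++ pvRep l) := by
  induction l generalizing done c with
  | nil => simpa [PySem.List.enumerate, pvRep] using h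
  | cons x xs ih =>
    rw [PySem.List.enumerate_cons, List.foldl_cons]
    by_cases hx : x = "and"
    · subst hx
      by_cases hm : "and" ∈ xs
      · have hne : c + 1 ≠ N := by
          have : xs.count "and" ≠ 0 := by simpa [List.count_eq_zero] using hm
          simp at h; omega
        simp only [if_pos hne, pvSet_at_len]
        have := ih (done ++ [", "]) (c + 1) (by simp at h ⊢; omega)
        simp only [List.length_append, List.length_cons, List.length_nil] at this
        push_cast at this ⊢
        simpa [pvRep, hm] using this
      · have heq : c + 1 = N := by
          have : xs.count "and" = 0 := by simpa [List.count_eq_zero] using hm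
          simp at h; omega
        simp only [if_neg (by omega : ¬c + 1 ≠ N)]
        have := ih (done ++ ["and"]) (c + 1) (by simp at h ⊢; omega)
        simp only [List.length_append, List.length_cons, List.length_nil] at this
        push_cast at this ⊢
        simpa [pvRep, hm] using this
    · simp only [if_neg hx]
      have := ih (done ++ [x]) c (by simp [hx] at h ⊢; omega)
      simp only [List.length_append, List.length_cons, List.length_nil] at this
      push_cast at this ⊢
      simpa [pvRep, hx] using this

set_option maxRecDepth 4000 in
/-- B's right-to-left fold with the seen-flag. -/
theorem pvFoldB (l : List String) (st : Bool × List String) :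
    l.reverse.foldl
      (fun (st : Bool × List String) (a : String) =>
        if a = "and" then (true, st.2 ++ [if st.1 = false then "and" else ", "])
        else (st.1, st.2 ++ [a])) st
    = ((st.1 || l.contains "and"), st.2 ++ (pvRepS st.1 l).reverse) := by
  induction l generalizing st with
  | nil => simp [pvRepS]
  | cons x xs ih =>
    rw [List.reverse_cons, List.foldl_append, ih st, List.foldl_cons, List.foldl_nil]
    by_cases hx : x = "and"
    · subst hx
      simp only [pvRepS, List.contains_cons]
      by_cases hs : (st.1 || xs.contains "and") = true
      · have : st.1 = true ∨ "and" ∈ xs := by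
          rcases Bool.or_eq_true_iff.mp hs with h | h
          · exact Or.inl h
          · exact Or.inr (by simpa using h)
        simp [this]
        intro h0
        rcases this with h | h
        · rw [h0] at h; cases h
        · exact h
      · have hs1 : st.1 = false := by
          cases h1 : st.1 <;> simp [h1] at hs ⊢
        have hm : "and" ∉ xs := by
          simp [hs1] at hs; simpa using hs
        simp [hs1, hm]
    · simp only [if_neg hx, pvRepS, List.contains_cons]
      have hx' : ("and" == x) = false := beq_eq_false_iff_ne.mpr (fun h => hx h.symm)
      simp [hx, hx']

-- ===== VERDICT (by name: the statement is the Claim_ definition above) =====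
theorem authorParse_spec : Claim_equal_authorParse := by
  intro s _
  unfold Spec_authorParse authorParse authorParse_alt
  generalize (PySem.Str.split? s " ").getD [] = sl
  have hA := pvFoldA (PySem.List.count sl "and") sl [] 0 (by simp [PySem.List.count_eq])
  have hB := pvFoldB sl (false, [])
  simp only [List.nil_append, List.length_nil, Nat.cast_zero] at hA hB
  simp only [hA, hB, List.reverse_reverse, pvRepS_false]
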